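-- pv_equiv track=rewrite | github.com/jair-eng/EfdContribuicoes | app/sped/bloco_0/bloco_0_0900.py | recalcular_0990_bloco0
-- ===== SOURCE A (Python) =====
-- from typing import Any, Dict, List, Optional
--
-- def recalcular_0990_bloco0(linhas_sped: List[str]) -> List[str]:
--     out = []
--     bloco0 = []
--     em_bloco0 = False
--     fechou = False
--
--     for ln in linhas_sped:
--         if ln.startswith("|0000|"):
--             em_bloco0 = True
--
--         if em_bloco0 and not fechou:
--             if ln.startswith("|0990|"):
--                 qtd0 = len(bloco0) + 1
--                 bloco0.append(f"|0990|{qtd0}|")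
--                 out.extend(bloco0)
--                 fechou = True
--                 em_bloco0 = False
--                 continue
--
--             bloco0.append(ln)
--             continue
--
--         out.append(ln)
--
--     if bloco0 and not fechou:
--         qtd0 = len(bloco0) + 1
--         bloco0.append(f"|0990|{qtd0}|")
--         out = bloco0 + out
--
--     return out
-- ===== SOURCE B (Python) =====
-- from typing import List, Optional
--
--
-- def _primeiro_indice(linhas: List[str], prefixo: str) -> Optional[int]:
--     for k, ln in enumerate(linhas):
--         if ln.startswith(prefixo):
--             return k
--     return None
--
--
-- def recalcular_0990_bloco0(linhas_sped: List[str]) -> List[str]: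
--     i = _primeiro_indice(linhas_sped, "|0000|")
--     if i is None:
--         return list(linhas_sped)
--     j2 = _primeiro_indice(linhas_sped[i:], "|0990|")
--     if j2 is None:
--         return linhas_sped[i:] + [f"|0990|{len(linhas_sped) - i + 1}|"] + linhas_sped[:i]
--     j = i + j2
--     return linhas_sped[:j] + [f"|0990|{j - i + 1}|"] + linhas_sped[j + 1:]
-- ===== Notes on version B (the rewrite author's own statement) =====
-- stated objective: simpler
-- what changed: Replaces A's one-pass four-variable state machine (out/bloco0/em_bloco0/fechou flags with a post-loop fixup) by two prefix-index searches plus list slicing: splice the recomputed |0990| record at the found index, or move the unclosed block to the front.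
import Mathlib
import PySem

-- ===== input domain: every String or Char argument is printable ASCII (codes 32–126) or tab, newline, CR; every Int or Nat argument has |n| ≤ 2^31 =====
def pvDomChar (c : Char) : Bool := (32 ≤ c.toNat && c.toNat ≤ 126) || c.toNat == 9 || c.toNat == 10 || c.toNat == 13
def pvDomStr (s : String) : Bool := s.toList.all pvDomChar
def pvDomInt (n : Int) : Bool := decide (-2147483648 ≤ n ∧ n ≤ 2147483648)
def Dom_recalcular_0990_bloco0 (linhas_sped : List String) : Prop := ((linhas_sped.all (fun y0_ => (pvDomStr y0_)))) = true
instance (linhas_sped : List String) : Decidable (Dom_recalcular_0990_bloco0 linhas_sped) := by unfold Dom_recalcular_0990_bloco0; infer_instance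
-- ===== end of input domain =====

-- B replaces A's one-pass four-flag state machine by two prefix-index searches plus
-- list slicing (objective: simpler); same return value on every input.

-- shared formatting helper: f"|0990|{n}|"
def pvRec (n : Int) : String := "|0990|" ++ PySem.Int.toStr n ++ "|"

-- ===== PORT A =====
-- loop body of A: state = (out, bloco0, em_bloco0, fechou)
def pvStepA (s : List String × List String × Bool × Bool) (ln : String) : List String × List String × Bool × Bool :=
  match s with
  | (out, bloco0, em_bloco0, fechou) =>
    let em_bloco0 := if PySem.Str.startswith ln "|0000|" then true else em_bloco0
    if em_bloco0 && !fechou then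
      if PySem.Str.startswith ln "|0990|" then
        (out ++ (bloco0 ++ [pvRec ((bloco0.length : Int) + 1)]),
         bloco0 ++ [pvRec ((bloco0.length : Int) + 1)], false, true)
      else
        (out, bloco0 ++ [ln], em_bloco0, fechou)
    else
      (out ++ [ln], bloco0, em_bloco0, fechou)

def recalcular_0990_bloco0 (linhas_sped : List String) : List String :=
  match linhas_sped.foldl pvStepA ([], [], false, false) with
  | (out, bloco0, _, fechou) =>
    if !bloco0.isEmpty && !fechou then
      (bloco0 ++ [pvRec ((bloco0.length : Int) + 1)]) ++ out
    else
      out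

-- ===== PORT B =====
-- Source B's _primeiro_indice: index of the first line starting with the prefix
def pvFirstIdx (linhas : List String) (pref : String) : Option Nat :=
  match linhas with
  | [] => none
  | x :: xs =>
    if PySem.Str.startswith x pref then some 0
    else (pvFirstIdx xs pref).map (· + 1)

def recalcular_0990_bloco0_alt (linhas_sped : List String) : List String :=
  match pvFirstIdx linhas_sped "|0000|" with
  | none => linhas_sped
  | some i =>
    match pvFirstIdx (linhas_sped.drop i) "|0990|" with
    | none =>
      linhas_sped.drop i ++ [pvRec ((linhas_sped.length : Int) - i + 1)] ++ linhas_sped.take i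
    | some j2 =>
      let j := i + j2
      linhas_sped.take j ++ [pvRec ((j : Int) - i + 1)] ++ linhas_sped.drop (j + 1)

-- ===== PRECONDITION & SPEC =====
def Spec_recalcular_0990_bloco0 (linhas_sped : List String) (out : List String) : Prop := out = recalcular_0990_bloco0_alt linhas_sped
instance (linhas_sped : List String) (out : List String) : Decidable (Spec_recalcular_0990_bloco0 linhas_sped out) := by unfold Spec_recalcular_0990_bloco0; infer_instance

-- ===== CLAIM (what is proved, stated in full; the proofs are below) =====
def Claim_equal_recalcular_0990_bloco0 : Prop := ∀ (linhas_sped : List String), Dom_recalcular_0990_bloco0 linhas_sped → Spec_recalcular_0990_bloco0 linhas_sped (recalcular_0990_bloco0 linhas_sped)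

-- ===== LEMMAS AND PROOFS =====

-- a line starting with "|0000|" does not start with "|0990|"
lemma pv_sw_disj (x : String) (h : PySem.Str.startswith x "|0000|" = true) :
    PySem.Str.startswith x "|0990|" = false := by
  by_contra h9
  rw [Bool.not_eq_false] at h9
  simp only [PySem.Str.startswith_eq, PySem.Chars.startswith_iff] at h h9
  have hp := List.prefix_of_prefix_length_le h h9 (by decide)
  exact absurd (hp.eq_of_length (by decide)) (by decide)

lemma pvFirstIdx_none (pref : String) :
    ∀ (ls : List String), pvFirstIdx ls pref = none →
      ∀ x ∈ ls, PySem.Str.startswith x pref = false := by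
  intro ls
  induction ls with
  | nil => intro _ x hx; cases hx
  | cons a as ih =>
    intro h x hx
    rw [pvFirstIdx] at h
    by_cases ha : PySem.Str.startswith a pref = true
    · rw [if_pos ha] at h; cases h
    · rw [if_neg ha] at h
      rw [List.mem_cons] at hx
      rcases hx with rfl | hx
      · cases hb : PySem.Str.startswith x pref with
        | false => rfl
        | true => exact absurd hb ha
      · refine ih ?_ x hx
        cases h' : pvFirstIdx as pref with
        | none => rfl
        | some k => rw [h'] at h; cases h

lemma pvFirstIdx_some (pref : String) :
    ∀ (ls : List String) (i : Nat), pvFirstIdx ls pref = some i →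
      ∃ u y v, ls = u ++ y :: v ∧ u.length = i ∧
        (∀ x ∈ u, PySem.Str.startswith x pref = false) ∧
        PySem.Str.startswith y pref = true := by
  intro ls
  induction ls with
  | nil => intro i h; rw [pvFirstIdx] at h; cases h
  | cons a as ih =>
    intro i h
    rw [pvFirstIdx] at h
    by_cases ha : PySem.Str.startswith a pref = true
    · rw [if_pos ha] at h
      obtain rfl : (0 : Nat) = i := Option.some.inj h
      refine ⟨[], a, as, rfl, rfl, ?_, ha⟩
      intro x hx
      cases hx
    · rw [if_neg ha] at h
      cases h' : pvFirstIdx as pref with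
      | none => rw [h'] at h; cases h
      | some k =>
        rw [h', Option.map_some] at h
        obtain rfl : k + 1 = i := Option.some.inj h
        obtain ⟨u, y, v, hsplit, hlen, hu, hy⟩ := ih k h'
        refine ⟨a :: u, y, v, by simp [hsplit], by simp [hlen], ?_, hy⟩
        intro x hx
        rw [List.mem_cons] at hx
        rcases hx with rfl | hx
        · cases hb : PySem.Str.startswith x pref with
          | false => rfl
          | true => exact absurd hb ha
        · exact hu x hx

-- phase 1: before any "|0000|" line, every line goes to out
lemma pv_phase1 :
    ∀ (ls out : List String), (∀ x ∈ ls, PySem.Str.startswith x "|0000|" = false) →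
      ls.foldl pvStepA (out, [], false, false) = (out ++ ls, [], false, false) := by
  intro ls
  induction ls with
  | nil => intro out _; simp
  | cons a as ih =>
    intro out h
    have ha := h a (by simp)
    rw [List.foldl_cons]
    have hstep : pvStepA (out, [], false, false) a = (out ++ [a], [], false, false) := by
      simp only [pvStepA]
      rw [ha]
      simp
    rw [hstep, ih (out ++ [a]) (fun x hx => h x (by simp [hx]))]
    simp

-- phase 2: inside the open block, every line goes to bloco0
lemma pv_phase2 :
    ∀ (ls out b : List String), (∀ x ∈ ls, PySem.Str.startswith x "|0990|" = false) →
      ls.foldl pvStepA (out, b, true, false) = (out, b ++ ls, true, false) := by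
  intro ls
  induction ls with
  | nil => intro out b _; simp
  | cons a as ih =>
    intro out b h
    have ha := h a (by simp)
    rw [List.foldl_cons]
    have hstep : pvStepA (out, b, true, false) a = (out, b ++ [a], true, false) := by
      simp only [pvStepA, ite_self]
      rw [ha]
      simp
    rw [hstep, ih out (b ++ [a]) (fun x hx => h x (by simp [hx]))]
    simp

-- phase 3: after the block is closed, every line goes to out
lemma pv_phase3 :
    ∀ (ls out b : List String) (em : Bool), ∃ em',
      ls.foldl pvStepA (out, b, em, true) = (out ++ ls, b, em', true) := by
  intro ls
  induction ls with
  | nil => intro out b em; exact ⟨em, by simp⟩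
  | cons a as ih =>
    intro out b em
    rw [List.foldl_cons]
    have hstep : pvStepA (out, b, em, true) a =
        (out ++ [a], b, if PySem.Str.startswith a "|0000|" then true else em, true) := by
      by_cases h0 : PySem.Str.startswith a "|0000|" = true
      · simp only [pvStepA]; rw [h0]; simp
      · have h0' : PySem.Str.startswith a "|0000|" = false := by
          cases hb : PySem.Str.startswith a "|0000|" with
          | false => rfl
          | true => exact absurd hb h0
        simp only [pvStepA]; rw [h0']; simp
    rw [hstep]
    obtain ⟨em', h'⟩ := ih (out ++ [a]) b _
    exact ⟨em', by rw [h']; simp⟩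

-- the first "|0000|" line opens the block
lemma pv_step_open (out : List String) (y : String)
    (hy : PySem.Str.startswith y "|0000|" = true) :
    pvStepA (out, [], false, false) y = (out, [y], true, false) := by
  simp only [pvStepA]
  rw [hy, pv_sw_disj y hy]
  simp

-- a "|0990|" line closes the open block
lemma pv_step_close (out b : List String) (z : String)
    (hz : PySem.Str.startswith z "|0990|" = true) :
    pvStepA (out, b, true, false) z =
      (out ++ (b ++ [pvRec ((b.length : Int) + 1)]),
       b ++ [pvRec ((b.length : Int) + 1)], false, true) := by
  simp only [pvStepA, ite_self]
  rw [hz]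
  simp

-- ===== VERDICT (by name: the statement is the Claim_ definition above) =====
theorem recalcular_0990_bloco0_spec : Claim_equal_recalcular_0990_bloco0 := by
  intro linhas _
  show recalcular_0990_bloco0 linhas = recalcular_0990_bloco0_alt linhas
  cases h0 : pvFirstIdx linhas "|0000|" with
  | none =>
    unfold recalcular_0990_bloco0 recalcular_0990_bloco0_alt
    rw [h0, pv_phase1 linhas [] (pvFirstIdx_none _ _ h0)]
    simp
  | some i =>
    obtain ⟨u, y, v, hsplit, hlen, hu, hy⟩ := pvFirstIdx_some _ _ _ h0
    have hdrop : linhas.drop i = y :: v := by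
      rw [hsplit, ← hlen, List.drop_left]
    have htake : linhas.take i = u := by
      rw [hsplit, ← hlen, List.take_left]
    have s1 : List.foldl pvStepA ([], [], false, false) u = (u, [], false, false) := by
      rw [pv_phase1 u [] hu]; simp
    cases h9 : pvFirstIdx (linhas.drop i) "|0990|" with
    | none =>
      have hv9 := pvFirstIdx_none _ _ h9
      rw [hdrop] at hv9
      have hA : linhas.foldl pvStepA ([], [], false, false) = (u, y :: v, true, false) := by
        rw [hsplit, List.foldl_append, s1, List.foldl_cons, pv_step_open u y hy,
          pv_phase2 v u [y] (fun x hx => hv9 x (by simp [hx]))]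
        simp
      have h9' : pvFirstIdx (y :: v) "|0990|" = none := hdrop ▸ h9
      have hcnt : pvRec ((v.length : Int) + 1 + 1) = pvRec ((linhas.length : Int) - i + 1) := by
        refine congrArg pvRec ?_
        have hL : linhas.length = i + 1 + v.length := by rw [hsplit]; simp; omega
        omega
      unfold recalcular_0990_bloco0 recalcular_0990_bloco0_alt
      rw [h0, hA]
      simp [h9', hdrop, htake, hcnt]
    | some j2 =>
      obtain ⟨u2, z, v2, hsplit2, hlen2, hu2, hz⟩ := pvFirstIdx_some _ _ _ h9
      rw [hdrop] at hsplit2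
      have hy9 : PySem.Str.startswith y "|0990|" = false := pv_sw_disj y hy
      cases u2 with
      | nil =>
        rw [List.nil_append] at hsplit2
        rw [(List.cons.inj hsplit2).1] at hy9
        rw [hy9] at hz; cases hz
      | cons y' u2' =>
        obtain ⟨hy', hv⟩ := List.cons.inj hsplit2
        subst hy'
        have hj2 : j2 = u2'.length + 1 := by simpa using hlen2.symm
        have hlinhas : linhas = (u ++ y :: u2') ++ z :: v2 := by
          rw [hsplit, hv]; simp
        have hu2' : ∀ x ∈ u2', PySem.Str.startswith x "|0990|" = false :=
          fun x hx => hu2 x (by simp [hx])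
        have s2 : List.foldl pvStepA (u, [], false, false) (y :: u2') = (u, y :: u2', true, false) := by
          rw [List.foldl_cons, pv_step_open u y hy, pv_phase2 u2' u [y] hu2']
          simp
        obtain ⟨em', hph3⟩ := pv_phase3 v2
          (u ++ ((y :: u2') ++ [pvRec ((((y :: u2') : List String).length : Int) + 1)]))
          ((y :: u2') ++ [pvRec ((((y :: u2') : List String).length : Int) + 1)]) false
        have s3 : List.foldl pvStepA (u, y :: u2', true, false) (z :: v2) =
            (u ++ ((y :: u2') ++ [pvRec ((((y :: u2') : List String).length : Int) + 1)]) ++ v2,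
             (y :: u2') ++ [pvRec ((((y :: u2') : List String).length : Int) + 1)], em', true) := by
          rw [List.foldl_cons, pv_step_close u (y :: u2') z hz, hph3]
        have hA : linhas.foldl pvStepA ([], [], false, false) =
            (u ++ ((y :: u2') ++ [pvRec ((((y :: u2') : List String).length : Int) + 1)]) ++ v2,
             (y :: u2') ++ [pvRec ((((y :: u2') : List String).length : Int) + 1)], em', true) := by
          rw [hlinhas, List.foldl_append, List.foldl_append, s1, s2, s3]
        have hlu : (u ++ y :: u2').length = i + j2 := by
          simp; omega
        have htakej : linhas.take (i + j2) = u ++ y :: u2' := by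
          rw [hlinhas, ← hlu, List.take_left]
        have hdropj : linhas.drop (i + j2 + 1) = v2 := by
          have h1 : ((u ++ y :: u2') ++ [z]).length = i + j2 + 1 := by simp; omega
          have h2 : linhas = ((u ++ y :: u2') ++ [z]) ++ v2 := by rw [hlinhas]; simp
          rw [h2, ← h1, List.drop_left]
        have hcnt2 : pvRec ((u2'.length : Int) + 1 + 1) = pvRec ((j2 : Int) + 1) := by
          refine congrArg pvRec ?_
          omega
        unfold recalcular_0990_bloco0 recalcular_0990_bloco0_alt
        rw [h0, hA]
        simp [h9, htakej, hdropj, hcnt2]
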